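-- pv_equiv track=rewrite | github.com/openrsgis/ESDCforTrainingDML | utils/entityClassFiltering.py | if_Delete_SomeLabel
-- ===== SOURCE A (Python) =====
-- def if_Delete_SomeLabel(raw_ner):
--     dic_to_delete = {}
--     index_to_delete = []
--     for i in range(len(raw_ner)):
--         for index, var in enumerate(raw_ner[i]):
--             dic_to_delete[index] = var
--         for j in range(len(raw_ner[i])):
--             if (len(raw_ner[i][j]) == 3 and (raw_ner[i][j][2] == 'sensor' or
--                                              raw_ner[i][j][2] == 'method'or
--                                              raw_ner[i][j][2] == 'other_spatial'or
--                                              raw_ner[i][j][2] == 'other_time'or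
--                                              raw_ner[i][j][2] == 'raw data name')) or \
--                     (len(raw_ner[i][j]) == 5 and (raw_ner[i][j][4] == 'sensor' or
--                                              raw_ner[i][j][4] == 'method'or
--                                              raw_ner[i][j][4] == 'other_spatial'or
--                                              raw_ner[i][j][4] == 'other_time'or
--                                              raw_ner[i][j][4] == 'raw data name')):
--                 index_to_delete.append(j)
--         for k in index_to_delete:
--             dic_to_delete.pop(k)
--         raw_ner[i] = list(dic_to_delete.values())
--         index_to_delete.clear()
--         dic_to_delete.clear()
--     return raw_ner
-- ===== SOURCE B (Python) =====
-- LABELS = {'sensor', 'method', 'other_spatial', 'other_time', 'raw data name'}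
--
--
-- def _drop(t):
--     return (len(t) == 3 and t[2] in LABELS) or (len(t) == 5 and t[4] in LABELS)
--
--
-- def if_Delete_SomeLabel(raw_ner):
--     for i, row in enumerate(raw_ner):
--         raw_ner[i] = [t for t in row if not _drop(t)]
--     return raw_ner
-- ===== Notes on version B (the rewrite author's own statement) =====
-- stated objective: simpler
-- what changed: Replaces the per-row dict-build / collect-indices / pop / rebuild-from-values sequence with a single-pass filter per row using one unwanted-label set and a small keep/drop predicate; same in-place assignment and return value.
import Mathlib
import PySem

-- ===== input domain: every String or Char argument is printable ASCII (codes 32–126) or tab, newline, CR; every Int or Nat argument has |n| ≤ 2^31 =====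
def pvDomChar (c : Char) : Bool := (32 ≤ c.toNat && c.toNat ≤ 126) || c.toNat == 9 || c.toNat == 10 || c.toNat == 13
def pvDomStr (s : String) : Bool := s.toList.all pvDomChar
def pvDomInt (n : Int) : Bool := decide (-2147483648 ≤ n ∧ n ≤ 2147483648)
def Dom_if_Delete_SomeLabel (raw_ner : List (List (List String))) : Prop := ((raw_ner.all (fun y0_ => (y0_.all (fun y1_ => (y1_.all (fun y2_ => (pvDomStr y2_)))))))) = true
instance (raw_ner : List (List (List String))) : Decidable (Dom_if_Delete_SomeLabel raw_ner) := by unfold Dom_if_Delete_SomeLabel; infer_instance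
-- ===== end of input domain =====

-- B replaces A's per-row dict-build / collect-bad-indices / pop / rebuild-from-values
-- sequence with a single-pass filter per row (objective: simpler).  A mutates raw_ner in
-- place; B performs the same per-row in-place assignment, and the theorems below are
-- about the returned value.

-- ===== PORT A =====
-- A's row condition, the literal chain of length tests and equality disjunctions.
def pvBadA (t : List String) : Bool :=
  (t.length == 3 && (PySem.List.pyGetD t 2 "" == "sensor" ||
                     PySem.List.pyGetD t 2 "" == "method" ||
                     PySem.List.pyGetD t 2 "" == "other_spatial" ||
                     PySem.List.pyGetD t 2 "" == "other_time" ||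
                     PySem.List.pyGetD t 2 "" == "raw data name")) ||
  (t.length == 5 && (PySem.List.pyGetD t 4 "" == "sensor" ||
                     PySem.List.pyGetD t 4 "" == "method" ||
                     PySem.List.pyGetD t 4 "" == "other_spatial" ||
                     PySem.List.pyGetD t 4 "" == "other_time" ||
                     PySem.List.pyGetD t 4 "" == "raw data name"))

-- the body of A's i-loop: dic_to_delete and index_to_delete start empty each iteration
-- (they are cleared at the end of the previous one).  dict.pop(k) is ported as erase:
-- every popped key was inserted by the enumerate loop, so it is always present.
def pvRowA (row : List (List String)) : List (List String) :=
  let dic := (PySem.List.enumerate row).foldl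
    (fun d p => d.insert p.1 p.2) (PySem.Dict.empty : PySem.Dict Int (List String))
  let idxs := (PySem.List.pyRange 0 (row.length : Int) 1).foldl
    (fun acc j => if pvBadA (PySem.List.pyGetD row j []) then acc ++ [j] else acc) ([] : List Int)
  let dic2 := idxs.foldl (fun d k => d.erase k) dic
  dic2.values

-- the i-loop writes raw_ner[i] from raw_ner[i] only, so it is a map over the rows
def if_Delete_SomeLabel (raw_ner : List (List (List String))) : List (List (List String)) :=
  raw_ner.map pvRowA

-- ===== PORT B =====
def pvLabels : List String := ["sensor", "method", "other_spatial", "other_time", "raw data name"]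

def pvDrop (t : List String) : Bool :=
  (t.length == 3 && pvLabels.contains (PySem.List.pyGetD t 2 "")) ||
  (t.length == 5 && pvLabels.contains (PySem.List.pyGetD t 4 ""))

def if_Delete_SomeLabel_alt (raw_ner : List (List (List String))) : List (List (List String)) :=
  raw_ner.map (fun row => row.filter (fun t => !pvDrop t))

-- ===== PRECONDITION & SPEC =====
def Spec_if_Delete_SomeLabel (raw_ner : List (List (List String))) (out : List (List (List String))) : Prop := out = if_Delete_SomeLabel_alt raw_ner
instance (raw_ner : List (List (List String))) (out : List (List (List String))) : Decidable (Spec_if_Delete_SomeLabel raw_ner out) := by unfold Spec_if_Delete_SomeLabel; infer_instance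

-- ===== CLAIM (what is proved, stated in full; the proofs are below) =====
def Claim_equal_if_Delete_SomeLabel : Prop := ∀ (raw_ner : List (List (List String))), Dom_if_Delete_SomeLabel raw_ner → Spec_if_Delete_SomeLabel raw_ner (if_Delete_SomeLabel raw_ner)

-- ===== LEMMAS AND PROOFS =====

-- the two row predicates agree (B's set membership unfolds to A's disjunction chain)
theorem pvBadA_eq_pvDrop (t : List String) : pvBadA t = pvDrop t := by
  simp only [pvBadA, pvDrop, pvLabels, List.contains_cons, List.contains_nil,
    Bool.or_false, Bool.or_assoc]

-- folding erase over a key list filters the items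
theorem erase_foldl_items {κ ν : Type} [BEq κ] (ks : List κ) (d : PySem.Dict κ ν) :
    (ks.foldl (fun d k => d.erase k) d).items
      = d.items.filter (fun p => !ks.contains p.1) := by
  induction ks generalizing d with
  | nil => simp
  | cons k ks ih =>
    rw [List.foldl_cons, ih]
    simp only [PySem.Dict.erase, List.filter_filter]
    apply List.filter_congr
    intro p _
    simp [List.contains_cons, Bool.not_or, Bool.and_comm]

-- the per-row equivalence: A's dict machinery computes B's filter
theorem pvRowA_eq (row : List (List String)) :
    pvRowA row = row.filter (fun t => !pvDrop t) := by
  unfold pvRowA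
  have hfresh : ∀ p ∈ PySem.List.enumerate row,
      (PySem.Dict.empty : PySem.Dict Int (List String)).contains p.1 = false := by
    intro p _; simp
  have hnodup : ((PySem.List.enumerate row).map (·.1)).Nodup := by
    rw [PySem.List.map_fst_enumerate]
    exact PySem.List.nodup_pyRange_one 0 (0 + (row.length : Int))
  have hitems :
      ((PySem.List.enumerate row).foldl
        (fun d p => d.insert p.1 p.2) (PySem.Dict.empty : PySem.Dict Int (List String))).items
      = PySem.List.enumerate row := by
    rw [PySem.Dict.items_foldl_insert_fresh _ _ _ _ hfresh hnodup]
    simp [PySem.Dict.empty]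
  have hidxs :
      (PySem.List.pyRange 0 (row.length : Int) 1).foldl
        (fun acc j => if pvBadA (PySem.List.pyGetD row j []) then acc ++ [j] else acc) ([] : List Int)
      = (PySem.List.pyRange 0 (row.length : Int) 1).filter
          (fun j => pvBadA (PySem.List.pyGetD row j [])) := by
    rw [PySem.List.foldl_append_if_eq_filter]; simp
  rw [hidxs]
  simp only [PySem.Dict.values, erase_foldl_items, hitems]
  rw [List.filter_congr (q := fun p => !pvDrop p.2)
    (by
      intro p hp
      rw [PySem.List.mem_enumerate_iff] at hp
      obtain ⟨k, hk, rfl⟩ := hp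
      simp only [zero_add]
      rw [← pvBadA_eq_pvDrop]
      by_cases hb : pvBadA row[k] = true
      · have hmem : (k : Int) ∈ (PySem.List.pyRange 0 (row.length : Int) 1).filter
            (fun j => pvBadA (PySem.List.pyGetD row j [])) := by
          rw [List.mem_filter, PySem.List.mem_pyRange_one]
          refine ⟨⟨by positivity, by exact_mod_cast hk⟩, ?_⟩
          rw [PySem.List.pyGetD_natCast, List.getD_eq_getElem _ _ hk]
          exact hb
        simp [hmem, hb]
      · have hmem : (k : Int) ∉ (PySem.List.pyRange 0 (row.length : Int) 1).filter
            (fun j => pvBadA (PySem.List.pyGetD row j [])) := by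
          rw [List.mem_filter]
          rintro ⟨-, hbad⟩
          rw [PySem.List.pyGetD_natCast] at hbad
          rw [List.getD_eq_getElem _ _ hk] at hbad
          exact hb hbad
        simp [hmem, hb])]
  have : (fun p : Int × List String => !pvDrop p.2) = (fun p => !pvDrop p) ∘ (·.2) := rfl
  rw [this, ← List.filter_map, PySem.List.map_snd_enumerate]

-- ===== VERDICT (by name: the statement is the Claim_ definition above) =====
theorem if_Delete_SomeLabel_spec : Claim_equal_if_Delete_SomeLabel := by
  intro raw_ner _
  unfold Spec_if_Delete_SomeLabel if_Delete_SomeLabel if_Delete_SomeLabel_alt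
  exact List.map_congr_left (fun row _ => pvRowA_eq row)
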